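-- pv_equiv track=rewrite | github.com/MintaAriel/ASE-Evolutionary-Algorithm | src/ea/structures/structure_generator.py | count_stoichometry
-- ===== SOURCE A (Python) =====
-- def count_stoichometry(lst):
--     """
--     Count occurrences of each unique value in a list.
--
--     Args:
--         lst (list): Input list of hashable elements.
--
--     Returns:
--         tuple: (counts_dict, unique_tuple)
--             counts_dict: Dictionary with elements as keys and their counts as values.
--             unique_tuple: Tuple containing the unique elements in the order they first appear.
--     """
--     counts = {}
--     unique_list = []
--     for item in lst:
--         if item not in counts:
--             counts[item] = 1
--             unique_list.append(item)
--         else: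
--             counts[item] += 1
--     return counts, tuple(unique_list)
-- ===== SOURCE B (Python) =====
-- def count_stoichometry(lst):
--     uniques = list(dict.fromkeys(lst))
--     return {u: lst.count(u) for u in uniques}, tuple(uniques)
-- ===== Notes on version B (the rewrite author's own statement) =====
-- stated objective: alternative
-- what changed: B replaces A's single counting pass with two stages: first deduplicate via dict.fromkeys to get the first-appearance order, then compute each count by a separate lst.count scan per unique element (O(n*u) counting instead of one incremental dict pass).
import Mathlib
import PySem

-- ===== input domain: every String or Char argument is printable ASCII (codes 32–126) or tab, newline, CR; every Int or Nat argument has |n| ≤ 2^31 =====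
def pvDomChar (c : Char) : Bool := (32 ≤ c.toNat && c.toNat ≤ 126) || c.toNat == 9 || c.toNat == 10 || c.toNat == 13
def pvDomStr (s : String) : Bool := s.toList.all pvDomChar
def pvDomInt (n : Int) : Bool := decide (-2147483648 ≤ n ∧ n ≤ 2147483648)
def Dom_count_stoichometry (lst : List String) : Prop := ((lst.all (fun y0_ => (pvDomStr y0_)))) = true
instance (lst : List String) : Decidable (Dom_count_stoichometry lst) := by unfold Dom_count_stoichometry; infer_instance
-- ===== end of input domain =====

-- B replaces A's single incremental counting pass with two stages: dedup first (dict.fromkeys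
-- for the first-appearance order), then one lst.count scan per unique element (objective: alternative).

-- ===== PORT A =====
def count_stoichometry (lst : List String) : (List (String × Int)) × List String :=
  let st := lst.foldl (fun (st : PySem.Dict String Int × List String) item =>
      if st.1.contains item = false then
        (st.1.insert item 1, st.2 ++ [item])
      else
        (st.1.insert item (st.1.getD item 0 + 1), st.2))
    (PySem.Dict.empty, [])
  (st.1.items, st.2)

-- ===== PORT B =====
def count_stoichometry_alt (lst : List String) : (List (String × Int)) × List String :=
  let uniques := PySem.List.dedup lst
  let counts := uniques.foldl (fun (d : PySem.Dict String Int) u =>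
      d.insert u (lst.count u : Int)) PySem.Dict.empty
  (counts.items, uniques)

-- ===== PRECONDITION & SPEC =====
def Spec_count_stoichometry (lst : List String) (out : (List (String × Int)) × List String) : Prop := out = count_stoichometry_alt lst
instance (lst : List String) (out : (List (String × Int)) × List String) : Decidable (Spec_count_stoichometry lst out) := by unfold Spec_count_stoichometry; infer_instance

-- ===== CLAIM (what is proved, stated in full; the proofs are below) =====
def Claim_equal_count_stoichometry : Prop := ∀ (lst : List String), Dom_count_stoichometry lst → Spec_count_stoichometry lst (count_stoichometry lst)

-- ===== LEMMAS AND PROOFS =====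

-- Loop invariant for A: A's pair-state loop equals the counter fold together with its key list.
theorem count_stoichometry_A_inv (lst : List String) :
    ∀ (d : PySem.Dict String Int) (u : List String), u = d.keys →
    (lst.foldl (fun (st : PySem.Dict String Int × List String) item =>
        if st.1.contains item = false then
          (st.1.insert item 1, st.2 ++ [item])
        else
          (st.1.insert item (st.1.getD item 0 + 1), st.2)) (d, u))
      = (lst.foldl (fun (d : PySem.Dict String Int) item =>
          d.insert item (d.getD item 0 + 1)) d,
         (lst.foldl (fun (d : PySem.Dict String Int) item =>
          d.insert item (d.getD item 0 + 1)) d).keys) := by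
  induction lst with
  | nil => intro d u hu; simp [hu]
  | cons x xs ih =>
    intro d u hu
    simp only [List.foldl_cons]
    by_cases hc : d.contains x = false
    · rw [if_pos hc, PySem.Dict.getD_of_not_contains d 0 hc]
      have h1 : (0 : Int) + 1 = 1 := by ring
      rw [h1]
      exact ih (d.insert x 1) (u ++ [x])
        (by rw [hu, PySem.Dict.keys_insert_of_not_contains d 1 hc])
    · rw [if_neg hc]
      have hct : d.contains x = true := by
        cases h : d.contains x
        · exact absurd h hc
        · rfl
      exact ih (d.insert x (d.getD x 0 + 1)) u
        (by rw [hu, PySem.Dict.keys_insert_of_contains d _ hct])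

-- B's staged dict over fresh distinct keys lists exactly (u, count) pairs in dedup order.
theorem count_stoichometry_B_items (lst : List String) :
    ((PySem.List.dedup lst).foldl (fun (d : PySem.Dict String Int) u =>
        d.insert u (lst.count u : Int)) PySem.Dict.empty).items
      = (PySem.List.dedup lst).map (fun u => (u, (lst.count u : Int))) := by
  have := PySem.Dict.items_foldl_insert_fresh (l := PySem.List.dedup lst)
    (d := (PySem.Dict.empty : PySem.Dict String Int)) (k := fun u => u)
    (v := fun u => (lst.count u : Int))
    (by intro a _; simp [PySem.Dict.contains_empty])
    (by simp)
  simpa [PySem.Dict.items] using this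

-- ===== VERDICT (by name: the statement is the Claim_ definition above) =====
theorem count_stoichometry_spec : Claim_equal_count_stoichometry := by
  intro lst _
  unfold Spec_count_stoichometry count_stoichometry count_stoichometry_alt
  rw [count_stoichometry_A_inv lst PySem.Dict.empty [] (by simp [PySem.Dict.keys_empty])]
  simp only []
  rw [count_stoichometry_B_items lst]
  simp only [PySem.Dict.foldl_insert_getD_add_one_eq_counter]
  rw [PySem.Dict.items_counter, PySem.Dict.keys_counter]
  simp
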